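-- pv_equiv track=rewrite | github.com/vionion/advent-of-code-2019 | 2019/src/main.py | _filter_horisontal_segments
-- ===== SOURCE A (Python) =====
-- def _manhattan_distance(x, y, x0=0, y0=0):
--     return abs(x - x0) + abs(y - y0)
--
-- def _filter_horisontal_segments(wire_coordinates):
--     horisontal_segments = []
--     last_point = wire_coordinates[-1]
--     steps_required = 0
--     for i in range(0, len(wire_coordinates)):
--         point = wire_coordinates[i]
--         # just the most clear check for non-last point I could came up with
--         if point is not last_point:
--             next_point = wire_coordinates[i + 1]
--             point_a_y = point[1]
--             point_b_y = next_point[1]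
--             if point_a_y == point_b_y:
--                 horisontal_segments.append((point, next_point, steps_required))
--             steps_required += _manhattan_distance(next_point[0], next_point[1], point[0], point[1])
--     return horisontal_segments
-- ===== SOURCE B (Python) =====
-- def _filter_horisontal_segments(wire_coordinates):
--     # Walk the consecutive pairs BACK-TO-FRONT, accumulating the suffix distance
--     # (distance from each point to the wire's end) and collecting horizontal pairs
--     # in reverse order; a final pass converts each suffix into the prefix step
--     # count via total - suffix.
--     backwards = list(zip(wire_coordinates[1:], wire_coordinates))[::-1]
--     rev_segments = []
--     suffix = 0
--     for (x1, y1), (x0, y0) in backwards: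
--         suffix += abs(x1 - x0) + abs(y1 - y0)
--         if y0 == y1:
--             rev_segments.append(((x0, y0), (x1, y1), suffix))
--     total = suffix
--     return [(p, q, total - s) for (p, q, s) in reversed(rev_segments)]
-- ===== Notes on version B (the rewrite author's own statement) =====
-- stated objective: alternative
-- what changed: Instead of a forward index loop with a running prefix accumulator, B traverses the consecutive pairs back-to-front accumulating SUFFIX distances, collects horizontal pairs in reverse order, and a final pass converts each suffix to the prefix step count as total - suffix.
import Mathlib
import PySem

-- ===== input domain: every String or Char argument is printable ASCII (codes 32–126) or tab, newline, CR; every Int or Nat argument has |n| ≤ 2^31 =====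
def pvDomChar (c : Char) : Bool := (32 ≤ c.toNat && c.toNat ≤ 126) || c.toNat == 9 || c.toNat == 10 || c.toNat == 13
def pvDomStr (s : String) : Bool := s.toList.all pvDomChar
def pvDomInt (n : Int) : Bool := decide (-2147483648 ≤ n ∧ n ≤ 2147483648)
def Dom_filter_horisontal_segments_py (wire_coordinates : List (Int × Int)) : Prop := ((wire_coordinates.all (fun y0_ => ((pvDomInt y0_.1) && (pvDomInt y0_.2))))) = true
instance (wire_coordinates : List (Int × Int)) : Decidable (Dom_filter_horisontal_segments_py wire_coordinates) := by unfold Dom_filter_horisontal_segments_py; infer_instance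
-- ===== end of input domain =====

-- B replaces A's forward index loop with its running prefix accumulator by a back-to-front
-- traversal accumulating suffix distances plus a final total-minus-suffix correction pass
-- (alternative decomposition, same cost).


-- ===== PORT A =====
-- `last_point = wire_coordinates[-1]` raises IndexError on []: excluded by Pre_.
-- `point is not last_point`: in the value model the list elements are distinct runtime
-- objects except that index len-1 IS the object bound to last_point, so the identity
-- test is ported as `i ≠ len - 1` (exact for inputs delivered as fresh literals).
def filter_horisontal_segments_py (wire_coordinates : List (Int × Int)) : List ((Int × Int) × (Int × Int) × Int) :=
  let n : Int := PySem.List.len wire_coordinates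
  ((PySem.List.pyRange 0 n 1).foldl
    (fun (st : List ((Int × Int) × (Int × Int) × Int) × Int) i =>
      let point := PySem.List.pyGetD wire_coordinates i ((0 : Int), (0 : Int))
      if i ≠ n - 1 then
        -- inside Pre_ (nonempty list) i + 1 is in range here, so pyGetD is exact
        let next_point := PySem.List.pyGetD wire_coordinates (i + 1) ((0 : Int), (0 : Int))
        ((if point.2 = next_point.2 then st.1 ++ [(point, next_point, st.2)] else st.1),
         st.2 + (|next_point.1 - point.1| + |next_point.2 - point.2|))
      else st)
    ([], 0)).1

-- ===== PORT B =====
-- the loop body: push horizontal pairs with their SUFFIX distance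
def bstep (st : List ((Int × Int) × (Int × Int) × Int) × Int)
    (nq : (Int × Int) × (Int × Int)) : List ((Int × Int) × (Int × Int) × Int) × Int :=
  let suffix := st.2 + (|nq.1.1 - nq.2.1| + |nq.1.2 - nq.2.2|)
  ((if nq.2.2 = nq.1.2 then st.1 ++ [(nq.2, nq.1, suffix)] else st.1), suffix)

-- backwards = list(zip(ws[1:], ws))[::-1]; loop pushes horizontal pairs with their SUFFIX
-- distance; the final comprehension over reversed(rev_segments) maps suffix ↦ total - suffix.
def filter_horisontal_segments_py_alt (wire_coordinates : List (Int × Int)) : List ((Int × Int) × (Int × Int) × Int) :=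
  let backwards := (PySem.List.slice? ((PySem.List.slice wire_coordinates (some 1) none).zip wire_coordinates) none none (-1)).getD []
  let st := backwards.foldl bstep ([], 0)
  st.1.reverse.map (fun x => (x.1, x.2.1, st.2 - x.2.2))

-- ===== PRECONDITION & SPEC =====
-- Pre_ excludes only the empty list, on which A raises IndexError at wire_coordinates[-1].
def Pre_filter_horisontal_segments_py (wire_coordinates : List (Int × Int)) : Prop :=
  wire_coordinates ≠ []
instance (wire_coordinates : List (Int × Int)) : Decidable (Pre_filter_horisontal_segments_py wire_coordinates) := by unfold Pre_filter_horisontal_segments_py; infer_instance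

def pvWitness_filter_horisontal_segments_py : (List (Int × Int)) := [((0 : Int), (0 : Int)), ((2 : Int), (0 : Int))]

def Spec_filter_horisontal_segments_py (wire_coordinates : List (Int × Int)) (out : List ((Int × Int) × (Int × Int) × Int)) : Prop := out = filter_horisontal_segments_py_alt wire_coordinates
instance (wire_coordinates : List (Int × Int)) (out : List ((Int × Int) × (Int × Int) × Int)) : Decidable (Spec_filter_horisontal_segments_py wire_coordinates out) := by unfold Spec_filter_horisontal_segments_py; infer_instance

-- ===== CLAIM (what is proved, stated in full; the proofs are below) =====
def Claim_equal_filter_horisontal_segments_py : Prop := ∀ (wire_coordinates : List (Int × Int)), Dom_filter_horisontal_segments_py wire_coordinates → Pre_filter_horisontal_segments_py wire_coordinates → Spec_filter_horisontal_segments_py wire_coordinates (filter_horisontal_segments_py wire_coordinates)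

-- ===== LEMMAS AND PROOFS =====

-- the common mathematical core: for each consecutive (point, next) pair emit it (with the
-- running prefix step count) when the y-coordinates agree
def segCore : List ((Int × Int) × (Int × Int)) → Int → List ((Int × Int) × (Int × Int) × Int)
  | [], _ => []
  | pq :: rest, s =>
      (if pq.1.2 = pq.2.2 then [(pq.1, pq.2, s)] else []) ++
        segCore rest (s + |pq.2.1 - pq.1.1| + |pq.2.2 - pq.1.2|)

-- B's backward loop, characterised recursively over the FORWARD (point, next) pair list:
-- bcore P = (horizontal pairs in reverse order, each with its suffix distance; total distance)
def bcore : List ((Int × Int) × (Int × Int)) → List ((Int × Int) × (Int × Int) × Int) × Int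
  | [] => ([], 0)
  | pq :: rest =>
      let r := bcore rest
      let s' := r.2 + (|pq.2.1 - pq.1.1| + |pq.2.2 - pq.1.2|)
      ((r.1 ++ if pq.1.2 = pq.2.2 then [(pq.1, pq.2, s')] else []), s')

-- the backward fold over the swapped reversed pair list computes bcore
lemma b_fold_rev (P : List ((Int × Int) × (Int × Int)))
    (acc : List ((Int × Int) × (Int × Int) × Int)) :
    ((P.map Prod.swap).reverse.foldl bstep (acc, 0)) =
      (acc ++ (bcore P).1, (bcore P).2) := by
  induction P generalizing acc with
  | nil => simp [bcore]
  | cons pq rest ih =>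
    simp only [List.map_cons, List.reverse_cons, List.foldl_append, List.foldl_cons,
      List.foldl_nil, ih]
    simp only [bstep, bcore, Prod.fst_swap, Prod.snd_swap]
    by_cases h : pq.1.2 = pq.2.2 <;> simp [h]

-- converting suffixes to prefixes turns bcore into segCore
lemma b_map_rev (P : List ((Int × Int) × (Int × Int))) (t : Int) :
    (bcore P).1.reverse.map (fun x => (x.1, x.2.1, t - x.2.2))
      = segCore P (t - (bcore P).2) := by
  induction P generalizing t with
  | nil => simp [bcore, segCore]
  | cons pq rest ih =>
    simp only [bcore, segCore, List.reverse_append, List.map_append]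
    by_cases h : pq.1.2 = pq.2.2
    · simp only [h, if_true, List.reverse_cons, List.reverse_nil, List.nil_append,
        List.map_cons, List.map_nil, ih, List.cons_append]
      congr 2
      ring
    · simp only [h, if_false, List.reverse_nil, List.map_nil, List.nil_append, ih]
      congr 1
      ring

lemma tail_zip_swap (ws : List (Int × Int)) :
    ws.tail.zip ws = (ws.zip ws.tail).map Prod.swap := by
  exact (List.zip_swap ws ws.tail).symm

lemma alt_eq_segCore (ws : List (Int × Int)) :
    filter_horisontal_segments_py_alt ws = segCore (ws.zip ws.tail) 0 := by
  unfold filter_horisontal_segments_py_alt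
  rw [PySem.List.slice_from_one, PySem.List.slice?_none_none_neg_one]
  simp only [Option.getD_some]
  rw [tail_zip_swap, b_fold_rev (ws.zip ws.tail) []]
  simp only [List.nil_append]
  have := b_map_rev (ws.zip ws.tail) (bcore (ws.zip ws.tail)).2
  simpa using this

def stepF (st : List ((Int × Int) × (Int × Int) × Int) × Int)
    (pq : (Int × Int) × (Int × Int)) : List ((Int × Int) × (Int × Int) × Int) × Int :=
  ((if pq.1.2 = pq.2.2 then st.1 ++ [(pq.1, pq.2, st.2)] else st.1),
   st.2 + (|pq.2.1 - pq.1.1| + |pq.2.2 - pq.1.2|))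

lemma a_fold (pairs : List ((Int × Int) × (Int × Int)))
    (acc : List ((Int × Int) × (Int × Int) × Int)) (s : Int) :
    (pairs.foldl stepF (acc, s)).1 = acc ++ segCore pairs s := by
  induction pairs generalizing acc s with
  | nil => simp [segCore]
  | cons pq rest ih =>
    simp only [List.foldl_cons, segCore, stepF]
    rw [show s + (|pq.2.1 - pq.1.1| + |pq.2.2 - pq.1.2|)
          = s + |pq.2.1 - pq.1.1| + |pq.2.2 - pq.1.2| from by ring]
    by_cases h : pq.1.2 = pq.2.2 <;> simp [h, ih]

lemma a_eq_segCore (ws : List (Int × Int)) (hne : ws ≠ []) :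
    filter_horisontal_segments_py ws = segCore (ws.zip ws.tail) 0 := by
  unfold filter_horisontal_segments_py
  have hlen : 1 ≤ ws.length := List.length_pos_iff.mpr hne
  simp only [PySem.List.len_eq]
  set n : Int := (ws.length : Int) with hn
  have h1 : (0 : Int) ≤ n - 1 := by omega
  have hsing : PySem.List.pyRange (n - 1) n 1 = [n - 1] := by
    have h := PySem.List.pyRange_one_singleton (n - 1)
    rw [show n - 1 + 1 = n from by ring] at h
    exact h
  have hsplit : PySem.List.pyRange 0 n 1
      = PySem.List.pyRange 0 (n - 1) 1 ++ [n - 1] := by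
    rw [PySem.List.pyRange_one_append 0 (n - 1) n h1 (by omega), hsing]
  rw [hsplit, List.foldl_append]
  simp only [List.foldl_cons, List.foldl_nil, ne_eq, not_true_eq_false, if_false]
  have hpairslen : ((ws.zip ws.tail).length : Int) = n - 1 := by
    simp only [List.length_zip, List.length_tail]
    omega
  have key : (PySem.List.pyRange 0 (n - 1) 1).foldl
      (fun (st : List ((Int × Int) × (Int × Int) × Int) × Int) i =>
        let point := PySem.List.pyGetD ws i ((0 : Int), (0 : Int))
        if i ≠ n - 1 then
          let next_point := PySem.List.pyGetD ws (i + 1) ((0 : Int), (0 : Int))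
          ((if point.2 = next_point.2 then st.1 ++ [(point, next_point, st.2)] else st.1),
           st.2 + (|next_point.1 - point.1| + |next_point.2 - point.2|))
        else st)
      ([], 0)
      = (ws.zip ws.tail).foldl stepF ([], 0) := by
    rw [← hpairslen]
    rw [PySem.List.foldl_congr_mem
      (g := fun (st : List ((Int × Int) × (Int × Int) × Int) × Int) j =>
        stepF st (PySem.List.pyGetD (ws.zip ws.tail) j (((0, 0) : Int × Int), ((0, 0) : Int × Int))))]
    · exact PySem.List.foldl_pyRange_zero_pyGetD' (ws.zip ws.tail) _ stepF ([], 0)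
    · intro acc x hx
      rw [PySem.List.mem_pyRange_one] at hx
      obtain ⟨hx0, hx1⟩ := hx
      have hxlt : x < n - 1 := by
        omega
      have hxlen : x.toNat < ws.length := by omega
      have hxlen1 : x.toNat + 1 < ws.length := by omega
      have hxp : x.toNat < (ws.zip ws.tail).length := by
        simp only [List.length_zip, List.length_tail]
        omega
      have hA : x < (ws.length : Int) := by omega
      have hB : x + 1 < (ws.length : Int) := by omega
      have hC : x < ((ws.zip ws.tail).length : Int) := by omega
      rw [PySem.List.pyGetD_eq_getElem ws ((0 : Int), (0 : Int)) hx0 hA,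
          PySem.List.pyGetD_eq_getElem ws ((0 : Int), (0 : Int)) (by omega) hB,
          PySem.List.pyGetD_eq_getElem (ws.zip ws.tail)
            (((0, 0) : Int × Int), ((0, 0) : Int × Int)) hx0 hC]
      have ht : (x + 1).toNat = x.toNat + 1 := by omega
      simp only [List.getElem_zip, List.getElem_tail, stepF, ht]
      rw [if_pos (show ¬ x = ((ws.zip ws.tail).length : Int) from by omega)]
  rw [key, a_fold]
  simp

-- ===== VERDICT (by name: the statement is the Claim_ definition above) =====
theorem filter_horisontal_segments_py_spec : Claim_equal_filter_horisontal_segments_py := by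
  intro ws _ hpre
  unfold Spec_filter_horisontal_segments_py
  rw [a_eq_segCore ws hpre, alt_eq_segCore]
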